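-- pv_equiv track=rewrite | github.com/cshintov/sentinel | sentinel/utils/utils.py | risk_histogram
-- ===== SOURCE A (Python) =====
-- def risk_histogram(alerts):
--     """ create a histogram of low, medium, and high risk alerts
--         :alerts a list of alerts (dicts)
--         :risk_hist a dict histogram of risklevels
--     """
--     risk_hist = {'low':0, 'medium':0, 'high':0}
--     for alert in alerts:
--         if alert['riskcode'] == '1':
--             risk_hist['low'] += 1
--         elif alert['riskcode'] == '2':
--             risk_hist['medium'] += 1
--         elif alert['riskcode'] == '3':
--             risk_hist['high'] += 1
--     return risk_hist
-- ===== SOURCE B (Python) =====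
-- def risk_histogram(alerts):
--     """ create a histogram of low, medium, and high risk alerts
--         :alerts a list of alerts (dicts)
--         :risk_hist a dict histogram of risklevels
--     """
--     codes = [alert['riskcode'] for alert in alerts]
--     return {'low': codes.count('1'), 'medium': codes.count('2'), 'high': codes.count('3')}
-- ===== Notes on version B (the rewrite author's own statement) =====
-- stated objective: idiomatic
-- what changed: Replaces the if/elif increment loop over a mutable dict with extracting the list of risk codes and building the result from three .count lookups.
import Mathlib
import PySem

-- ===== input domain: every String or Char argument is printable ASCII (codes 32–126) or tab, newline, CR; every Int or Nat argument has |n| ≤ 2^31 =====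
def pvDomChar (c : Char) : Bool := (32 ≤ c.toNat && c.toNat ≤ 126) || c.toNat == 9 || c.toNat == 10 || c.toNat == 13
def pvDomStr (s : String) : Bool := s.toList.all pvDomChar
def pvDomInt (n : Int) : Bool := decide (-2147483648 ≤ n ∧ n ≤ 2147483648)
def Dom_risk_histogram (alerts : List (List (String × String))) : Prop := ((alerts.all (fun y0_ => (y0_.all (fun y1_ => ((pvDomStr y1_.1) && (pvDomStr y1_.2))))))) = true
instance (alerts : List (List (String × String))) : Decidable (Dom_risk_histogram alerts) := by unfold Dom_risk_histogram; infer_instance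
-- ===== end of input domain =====

-- B builds the code list once and reads the three buckets off with .count; same O(n) cost, no mutated dict.

-- ===== PORT A =====
def riskStepA (h : PySem.Dict String Int) (alert : List (String × String)) : PySem.Dict String Int :=
  match (PySem.Dict.mk alert).get? "riskcode" with
  | none => h      -- KeyError in Python; excluded by Pre_
  | some rc =>
    if rc == "1" then h.modify "low" 0 (· + 1)
    else if rc == "2" then h.modify "medium" 0 (· + 1)
    else if rc == "3" then h.modify "high" 0 (· + 1)
    else h

def risk_histogram (alerts : List (List (String × String))) : List (String × Int) :=
  (alerts.foldl riskStepA (PySem.Dict.mk [("low", (0 : Int)), ("medium", 0), ("high", 0)])).items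

-- ===== PORT B =====
def risk_histogram_alt (alerts : List (List (String × String))) : List (String × Int) :=
  let codes := alerts.map (fun alert => ((PySem.Dict.mk alert).get? "riskcode").getD "")
  [("low", (codes.count "1" : Int)), ("medium", (codes.count "2" : Int)), ("high", (codes.count "3" : Int))]

-- ===== PRECONDITION & SPEC =====
-- Pre_ excludes alerts lacking a 'riskcode' key, on which Python A (and B) raise KeyError.
def Pre_risk_histogram (alerts : List (List (String × String))) : Prop :=
  ∀ a ∈ alerts, "riskcode" ∈ a.map Prod.fst
instance (alerts : List (List (String × String))) : Decidable (Pre_risk_histogram alerts) := by unfold Pre_risk_histogram; infer_instance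

def pvWitness_risk_histogram : (List (List (String × String))) :=
  [[("riskcode", "1")], [("riskcode", "3"), ("name", "x")]]

def Spec_risk_histogram (alerts : List (List (String × String))) (out : List (String × Int)) : Prop := out = risk_histogram_alt alerts
instance (alerts : List (List (String × String))) (out : List (String × Int)) : Decidable (Spec_risk_histogram alerts out) := by unfold Spec_risk_histogram; infer_instance

-- ===== CLAIM (what is proved, stated in full; the proofs are below) =====
def Claim_equal_risk_histogram : Prop := ∀ (alerts : List (List (String × String))), Dom_risk_histogram alerts → Pre_risk_histogram alerts → Spec_risk_histogram alerts (risk_histogram alerts)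

-- ===== LEMMAS AND PROOFS =====

-- a key present in the raw pair list is found by Dict.get?
lemma get?_mk_isSome (a : List (String × String)) (h : "riskcode" ∈ a.map Prod.fst) :
    ((PySem.Dict.mk a).get? "riskcode").isSome := by
  induction a with
  | nil => simp at h
  | cons p rest ih =>
    rw [PySem.Dict.get?_mk_cons]
    by_cases hp : p.1 == "riskcode"
    · simp [hp]
    · simp only [hp, if_false, Bool.false_eq_true]
      simp only [List.map_cons, List.mem_cons] at h
      exact ih (h.resolve_left (fun he => by simp [he] at hp))

lemma hist_foldl (alerts : List (List (String × String)))
    (hpre : Pre_risk_histogram alerts) (x y z : Int) :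
    alerts.foldl riskStepA (PySem.Dict.mk [("low", x), ("medium", y), ("high", z)])
    = PySem.Dict.mk
        [("low", x + ((alerts.map (fun a => ((PySem.Dict.mk a).get? "riskcode").getD "")).count "1" : Int)),
         ("medium", y + ((alerts.map (fun a => ((PySem.Dict.mk a).get? "riskcode").getD "")).count "2" : Int)),
         ("high", z + ((alerts.map (fun a => ((PySem.Dict.mk a).get? "riskcode").getD "")).count "3" : Int))] := by
  induction alerts generalizing x y z with
  | nil => simp
  | cons a rest ih =>
    have ha : "riskcode" ∈ a.map Prod.fst := hpre a (by simp)
    have hrest : Pre_risk_histogram rest := fun b hb => hpre b (by simp [hb])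
    obtain ⟨rc, hrc⟩ := Option.isSome_iff_exists.mp (get?_mk_isSome a ha)
    rw [List.foldl_cons]
    by_cases h1 : rc = "1"
    · have hstep : riskStepA (PySem.Dict.mk [("low", x), ("medium", y), ("high", z)]) a
          = PySem.Dict.mk [("low", x + 1), ("medium", y), ("high", z)] := by
        unfold riskStepA; rw [hrc]
        simp [h1, PySem.Dict.modify, PySem.Dict.getD, PySem.Dict.get?,
          PySem.Dict.insert, PySem.Dict.contains]
      rw [hstep, ih hrest]
      subst h1
      simp [hrc]
      omega
    · by_cases h2 : rc = "2"
      · have hstep : riskStepA (PySem.Dict.mk [("low", x), ("medium", y), ("high", z)]) a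
            = PySem.Dict.mk [("low", x), ("medium", y + 1), ("high", z)] := by
          unfold riskStepA; rw [hrc]
          simp [h2, PySem.Dict.modify, PySem.Dict.getD, PySem.Dict.get?,
            PySem.Dict.insert, PySem.Dict.contains]
        rw [hstep, ih hrest]
        subst h2
        simp [hrc]
        omega
      · by_cases h3 : rc = "3"
        · have hstep : riskStepA (PySem.Dict.mk [("low", x), ("medium", y), ("high", z)]) a
              = PySem.Dict.mk [("low", x), ("medium", y), ("high", z + 1)] := by
            unfold riskStepA; rw [hrc]
            simp [h3, PySem.Dict.modify, PySem.Dict.getD, PySem.Dict.get?,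
              PySem.Dict.insert, PySem.Dict.contains]
          rw [hstep, ih hrest]
          subst h3
          simp [hrc]
          omega
        · have hstep : riskStepA (PySem.Dict.mk [("low", x), ("medium", y), ("high", z)]) a
              = PySem.Dict.mk [("low", x), ("medium", y), ("high", z)] := by
            unfold riskStepA; rw [hrc]
            simp [h1, h2, h3]
          rw [hstep, ih hrest]
          simp [hrc, h1, h2, h3]

-- ===== VERDICT (by name: the statement is the Claim_ definition above) =====
theorem risk_histogram_spec : Claim_equal_risk_histogram := by
  intro alerts _ hpre
  unfold Spec_risk_histogram risk_histogram risk_histogram_alt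
  rw [hist_foldl alerts hpre 0 0 0]
  simp
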